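-- pv_equiv track=rewrite | github.com/amitcjmu/Stock-Analysis | backend/app/api/v1/discovery/asset_handlers/asset_processing.py | _standardize_os_family
-- ===== SOURCE A (Python) =====
-- def _standardize_os_family(os_name: str) -> str:
--     """Standardize operating system family."""
--     if not os_name:
--         return "Unknown"
--
--     os_lower = os_name.lower()
--
--     if any(term in os_lower for term in ["windows", "win"]):
--         return "Windows"
--     elif any(
--         term in os_lower
--         for term in ["linux", "ubuntu", "redhat", "centos", "debian"]
--     ):
--         return "Linux"
--     elif any(term in os_lower for term in ["unix", "aix", "solaris"]):
--         return "Unix"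
--     elif any(term in os_lower for term in ["mac", "darwin"]):
--         return "macOS"
--
--     return "Other"
-- ===== SOURCE B (Python) =====
-- # One left-to-right scan of the lowered string: at each position, a first-character
-- # dispatch table proposes the few keywords that could start there; matched keywords
-- # lower a best-priority accumulator, which is mapped to a family at the end.
-- _KW = {
--     # "windows" needs no entry: any occurrence of "windows" contains "win"
--     "w": (("win", 0),),
--     "l": (("linux", 1),),
--     "u": (("unix", 2), ("ubuntu", 1)),
--     "r": (("redhat", 1),),
--     "c": (("centos", 1),),
--     "d": (("debian", 1), ("darwin", 3)),
--     "a": (("aix", 2),),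
--     "s": (("solaris", 2),),
--     "m": (("mac", 3),),
-- }
-- _FAMILIES = ("Windows", "Linux", "Unix", "macOS", "Other")
--
--
-- def _standardize_os_family(os_name: str) -> str:
--     if not os_name:
--         return "Unknown"
--     s = os_name.lower()
--     best = 4
--     for i in range(len(s)):
--         for kw, p in _KW.get(s[i], ()):
--             if p < best and s.startswith(kw, i):
--                 best = p
--     return _FAMILIES[best]
-- ===== Notes on version B (the rewrite author's own statement) =====
-- stated objective: alternative
-- what changed: Replaces the per-family substring-containment branch chain by a single left-to-right scan of the string with a first-character dispatch table of (keyword, priority) pairs that maintains a best-priority accumulator, mapped to a family name at the end.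
import Mathlib
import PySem

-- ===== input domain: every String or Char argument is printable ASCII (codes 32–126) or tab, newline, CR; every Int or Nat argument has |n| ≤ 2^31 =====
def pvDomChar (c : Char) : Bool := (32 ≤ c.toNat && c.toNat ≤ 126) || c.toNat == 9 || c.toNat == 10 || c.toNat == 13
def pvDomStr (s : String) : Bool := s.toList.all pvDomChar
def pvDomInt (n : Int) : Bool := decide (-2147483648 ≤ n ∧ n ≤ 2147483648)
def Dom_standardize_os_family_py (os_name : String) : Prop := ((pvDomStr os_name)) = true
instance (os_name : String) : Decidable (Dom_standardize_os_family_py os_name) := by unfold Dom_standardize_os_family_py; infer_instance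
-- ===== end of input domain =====

-- B replaces the per-family substring-containment branch chain by one left-to-right scan
-- with a first-character dispatch table of (keyword, priority) pairs and a best-priority
-- accumulator; objective: alternative (same cost, different algorithm).

-- ===== PORT A =====
def standardize_os_family_py (os_name : String) : String :=
  if os_name = "" then "Unknown"
  else
    let os_lower := PySem.Str.lower os_name
    if (["windows", "win"]).any (fun term => PySem.Str.isIn term os_lower) then "Windows"
    else if (["linux", "ubuntu", "redhat", "centos", "debian"]).any (fun term => PySem.Str.isIn term os_lower) then "Linux"
    else if (["unix", "aix", "solaris"]).any (fun term => PySem.Str.isIn term os_lower) then "Unix"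
    else if (["mac", "darwin"]).any (fun term => PySem.Str.isIn term os_lower) then "macOS"
    else "Other"

-- ===== PORT B =====
-- the _KW first-character dispatch table of Source B
def pvKw (c : Char) : List (List Char × Nat) :=
  if c = 'w' then [(['w','i','n'], 0)]
  else if c = 'l' then [(['l','i','n','u','x'], 1)]
  else if c = 'u' then [(['u','n','i','x'], 2), (['u','b','u','n','t','u'], 1)]
  else if c = 'r' then [(['r','e','d','h','a','t'], 1)]
  else if c = 'c' then [(['c','e','n','t','o','s'], 1)]
  else if c = 'd' then [(['d','e','b','i','a','n'], 1), (['d','a','r','w','i','n'], 3)]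
  else if c = 'a' then [(['a','i','x'], 2)]
  else if c = 's' then [(['s','o','l','a','r','i','s'], 2)]
  else if c = 'm' then [(['m','a','c'], 3)]
  else []

-- the position loop of Source B: recursion on the suffix starting at position i;
-- `s.startswith(kw, i)` is `kw.isPrefixOf (suffix at i)`
def pvScan : List Char → Nat → Nat
  | [], best => best
  | c :: rest, best =>
      pvScan rest
        ((pvKw c).foldl
          (fun b kp => if kp.2 < b && kp.1.isPrefixOf (c :: rest) then kp.2 else b) best)

def pvFamilies : List String := ["Windows", "Linux", "Unix", "macOS", "Other"]

def standardize_os_family_py_alt (os_name : String) : String :=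
  if os_name = "" then "Unknown"
  else pvFamilies.getD (pvScan (PySem.Str.lower os_name).toList 4) "Other"

-- ===== PRECONDITION & SPEC =====
def Spec_standardize_os_family_py (os_name : String) (out : String) : Prop := out = standardize_os_family_py_alt os_name
instance (os_name : String) (out : String) : Decidable (Spec_standardize_os_family_py os_name out) := by unfold Spec_standardize_os_family_py; infer_instance

-- ===== CLAIM (what is proved, stated in full; the proofs are below) =====
def Claim_equal_standardize_os_family_py : Prop := ∀ (os_name : String), Dom_standardize_os_family_py os_name → Spec_standardize_os_family_py os_name (standardize_os_family_py os_name)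

-- ===== LEMMAS AND PROOFS =====

-- keywords of each priority (0 Windows, 1 Linux, 2 Unix, 3 macOS)
def pvKwOf : Nat → List (List Char)
  | 0 => [['w','i','n']]
  | 1 => [['l','i','n','u','x'], ['u','b','u','n','t','u'], ['r','e','d','h','a','t'],
          ['c','e','n','t','o','s'], ['d','e','b','i','a','n']]
  | 2 => [['u','n','i','x'], ['a','i','x'], ['s','o','l','a','r','i','s']]
  | 3 => [['m','a','c'], ['d','a','r','w','i','n']]
  | _ => []

-- "some keyword of priority p occurs somewhere in l, matched at a suffix"
def pvHit (l : List Char) (p : Nat) : Prop :=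
  ∃ c rest, (c :: rest) <:+ l ∧ ∃ kw, (kw, p) ∈ pvKw c ∧ kw.isPrefixOf (c :: rest)

lemma pvKw_mem {c : Char} {kw : List Char} {p : Nat} (h : (kw, p) ∈ pvKw c) :
    kw ∈ pvKwOf p ∧ kw.head? = some c := by
  unfold pvKw at h
  split_ifs at h with h1 h2 h3 h4 h5 h6 h7 h8 h9 <;> subst_vars <;>
    simp only [List.mem_cons, List.not_mem_nil, Prod.mk.injEq, or_false] at h <;>
    first
      | exact h.elim
      | (rcases h with ⟨hk, hp⟩ | ⟨hk, hp⟩ <;> subst_vars <;> exact ⟨by simp [pvKwOf], rfl⟩)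

lemma pvHit_of_kw (l : List Char) (c : Char) (kw' : List Char) (p : Nat)
    (hmem : (c :: kw', p) ∈ pvKw c) (hinf : (c :: kw') <:+: l) : pvHit l p := by
  obtain ⟨t, hpre, hsuf⟩ := List.infix_iff_prefix_suffix.mp hinf
  rcases t with _ | ⟨c2, t'⟩
  · exact absurd hpre (by simp)
  · obtain ⟨hc, hpre'⟩ := List.cons_prefix_cons.mp hpre
    subst hc
    exact ⟨c, t', hsuf, _, hmem, List.isPrefixOf_iff_prefix.mpr hpre⟩

lemma pvHit_iff (l : List Char) (p : Nat) :
    pvHit l p ↔ ∃ kw ∈ pvKwOf p, kw <:+: l := by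
  constructor
  · rintro ⟨c, rest, hsuf, kw, hmem, hpre⟩
    obtain ⟨hk, _⟩ := pvKw_mem hmem
    exact ⟨kw, hk, List.IsInfix.trans ⟨[], by simpa using List.isPrefixOf_iff_prefix.mp hpre⟩
      hsuf.isInfix⟩
  · rintro ⟨kw, hk, hinf⟩
    match p, hk with
    | 0, hk =>
      simp only [pvKwOf, List.mem_cons, List.not_mem_nil, or_false] at hk
      subst hk
      exact pvHit_of_kw l 'w' _ _ (by decide) hinf
    | 1, hk =>
      simp only [pvKwOf, List.mem_cons, List.not_mem_nil, or_false] at hk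
      rcases hk with hk | hk | hk | hk | hk <;> subst hk <;>
        first
          | exact pvHit_of_kw l 'l' _ _ (by decide) hinf
          | exact pvHit_of_kw l 'u' _ _ (by decide) hinf
          | exact pvHit_of_kw l 'r' _ _ (by decide) hinf
          | exact pvHit_of_kw l 'c' _ _ (by decide) hinf
          | exact pvHit_of_kw l 'd' _ _ (by decide) hinf
    | 2, hk =>
      simp only [pvKwOf, List.mem_cons, List.not_mem_nil, or_false] at hk
      rcases hk with hk | hk | hk <;> subst hk <;>
        first
          | exact pvHit_of_kw l 'u' _ _ (by decide) hinf
          | exact pvHit_of_kw l 'a' _ _ (by decide) hinf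
          | exact pvHit_of_kw l 's' _ _ (by decide) hinf
    | 3, hk =>
      simp only [pvKwOf, List.mem_cons, List.not_mem_nil, or_false] at hk
      rcases hk with hk | hk <;> subst hk <;>
        first
          | exact pvHit_of_kw l 'm' _ _ (by decide) hinf
          | exact pvHit_of_kw l 'd' _ _ (by decide) hinf
    | n + 4, hk => simp [pvKwOf] at hk

-- the inner fold never increases the accumulator
lemma pvInner_le (t : List Char) (xs : List (List Char × Nat)) (b : Nat) :
    xs.foldl (fun b kp => if kp.2 < b && kp.1.isPrefixOf t then kp.2 else b) b ≤ b := by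
  induction xs generalizing b with
  | nil => simp
  | cons x xs ih =>
      simp only [List.foldl_cons]
      split
      · next h =>
          simp only [Bool.and_eq_true, decide_eq_true_eq] at h
          exact le_trans (ih _) (le_of_lt h.1)
      · exact ih b

-- pvScan never increases the accumulator
lemma pvScan_le (l : List Char) (b : Nat) : pvScan l b ≤ b := by
  induction l generalizing b with
  | nil => simp [pvScan]
  | cons c rest ih => exact le_trans (ih _) (pvInner_le _ _ _)

lemma pvInner_le_of_mem {t : List Char} {xs : List (List Char × Nat)} {kw : List Char} {p : Nat}
    (hmem : (kw, p) ∈ xs) (hpre : kw.isPrefixOf t = true) (b : Nat) :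
    xs.foldl (fun b kp => if kp.2 < b && kp.1.isPrefixOf t then kp.2 else b) b ≤ p := by
  induction xs generalizing b with
  | nil => simp at hmem
  | cons x xs ih =>
      simp only [List.foldl_cons]
      rcases List.mem_cons.mp hmem with h | h
      · subst h
        by_cases hb : p < b
        · rw [if_pos (by simp [hb, hpre])]
          exact pvInner_le _ _ _
        · rw [if_neg (by simp [hb])]
          exact le_trans (pvInner_le _ _ _) (by omega)
      · exact ih h _

lemma pvScan_le_of_hit {l : List Char} {p : Nat} (h : pvHit l p) (b : Nat) :
    pvScan l b ≤ p := by
  induction l generalizing b with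
  | nil => obtain ⟨c, rest, hsuf, _⟩ := h; simp at hsuf
  | cons c rest ih =>
      obtain ⟨c', rest', hsuf, kw, hmem, hpre⟩ := h
      rcases List.suffix_cons_iff.mp hsuf with h | h
      · obtain ⟨hc, hr⟩ := List.cons.inj h
        subst hc; subst hr
        simp only [pvScan]
        exact le_trans (pvScan_le _ _) (pvInner_le_of_mem hmem hpre b)
      · exact ih ⟨c', rest', h, kw, hmem, hpre⟩ _

lemma pvInner_lb {t : List Char} {xs : List (List Char × Nat)} {q b : Nat}
    (hq : ∀ kw p, (kw, p) ∈ xs → kw.isPrefixOf t = true → q ≤ p) (hb : q ≤ b) :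
    q ≤ xs.foldl (fun b kp => if kp.2 < b && kp.1.isPrefixOf t then kp.2 else b) b := by
  induction xs generalizing b with
  | nil => simpa
  | cons x xs ih =>
      simp only [List.foldl_cons]
      refine ih (fun kw p hm hp => hq kw p (List.mem_cons_of_mem _ hm) hp) ?_
      split
      · next h =>
          simp only [Bool.and_eq_true, decide_eq_true_eq] at h
          exact hq x.1 x.2 (List.mem_cons_self ..) h.2
      · exact hb

lemma pvScan_lb {l : List Char} {q b : Nat} (hq : ∀ p, pvHit l p → q ≤ p) (hb : q ≤ b) :
    q ≤ pvScan l b := by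
  induction l generalizing b with
  | nil => simpa [pvScan]
  | cons c rest ih =>
      refine ih (fun p hp => hq p ?_) (pvInner_lb (fun kw p hm hpre =>
        hq p ⟨c, rest, List.suffix_refl _, kw, hm, hpre⟩) hb)
      obtain ⟨c', rest', hsuf, kw, hm, hpre⟩ := hp
      exact ⟨c', rest', hsuf.trans (List.suffix_cons _ _), kw, hm, hpre⟩

-- boolean "some keyword of priority p is contained in l", in A's vocabulary
def pvB (p : Nat) (l : List Char) : Bool := (pvKwOf p).any (fun kw => PySem.Chars.isIn kw l)

lemma pvB_iff_hit (p : Nat) (l : List Char) : pvB p l = true ↔ pvHit l p := by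
  rw [pvHit_iff]
  simp [pvB, PySem.Chars.isIn_iff_infix]

-- the scan computes exactly the branch index of A's chain
lemma pvScan_eq_chain (l : List Char) :
    pvScan l 4 = if pvB 0 l then 0 else if pvB 1 l then 1 else if pvB 2 l then 2
      else if pvB 3 l then 3 else 4 := by
  have hnone : ∀ p, pvHit l p → p ≤ 3 := by
    rintro p ⟨c, rest, _, kw, hm, _⟩
    unfold pvKw at hm
    split_ifs at hm <;> simp_all <;> omega
  split_ifs with h0 h1 h2 h3
  · exact Nat.le_antisymm (pvScan_le_of_hit ((pvB_iff_hit 0 l).mp h0) 4) (Nat.zero_le _)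
  · refine Nat.le_antisymm (pvScan_le_of_hit ((pvB_iff_hit 1 l).mp h1) 4) (pvScan_lb ?_ (by omega))
    intro p hp
    match p with
    | 0 => exact absurd ((pvB_iff_hit 0 l).mpr hp) (by simp_all)
    | p + 1 => omega
  · refine Nat.le_antisymm (pvScan_le_of_hit ((pvB_iff_hit 2 l).mp h2) 4) (pvScan_lb ?_ (by omega))
    intro p hp
    match p with
    | 0 => exact absurd ((pvB_iff_hit 0 l).mpr hp) (by simp_all)
    | 1 => exact absurd ((pvB_iff_hit 1 l).mpr hp) (by simp_all)
    | p + 2 => omega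
  · refine Nat.le_antisymm (pvScan_le_of_hit ((pvB_iff_hit 3 l).mp h3) 4) (pvScan_lb ?_ (by omega))
    intro p hp
    match p with
    | 0 => exact absurd ((pvB_iff_hit 0 l).mpr hp) (by simp_all)
    | 1 => exact absurd ((pvB_iff_hit 1 l).mpr hp) (by simp_all)
    | 2 => exact absurd ((pvB_iff_hit 2 l).mpr hp) (by simp_all)
    | p + 3 => omega
  · refine Nat.le_antisymm (pvScan_le _ _) (pvScan_lb ?_ (le_refl _))
    intro p hp
    have := hnone p hp
    match p with
    | 0 => exact absurd ((pvB_iff_hit 0 l).mpr hp) (by simp_all)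
    | 1 => exact absurd ((pvB_iff_hit 1 l).mpr hp) (by simp_all)
    | 2 => exact absurd ((pvB_iff_hit 2 l).mpr hp) (by simp_all)
    | 3 => exact absurd ((pvB_iff_hit 3 l).mpr hp) (by simp_all)
    | p + 4 => omega

-- a string containing "windows" also contains "win"
lemma isIn_windows_absorb (l : List Char) :
    (PySem.Chars.isIn ['w','i','n','d','o','w','s'] l = true ∨
      PySem.Chars.isIn ['w','i','n'] l = true) ↔ PySem.Chars.isIn ['w','i','n'] l = true := by
  constructor
  · rintro (h | h)
    · exact (PySem.Chars.isIn_iff_infix _ _).mpr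
        (List.IsInfix.trans (by decide : ['w','i','n'] <:+: ['w','i','n','d','o','w','s'])
          ((PySem.Chars.isIn_iff_infix _ _).mp h))
    · exact h
  · exact Or.inr

-- ===== VERDICT (by name: the statement is the Claim_ definition above) =====
theorem standardize_os_family_py_spec : Claim_equal_standardize_os_family_py := by
  intro os_name _
  unfold Spec_standardize_os_family_py standardize_os_family_py standardize_os_family_py_alt
  by_cases h : os_name = ""
  · simp [h]
  · simp only [h, if_false]
    rw [pvScan_eq_chain]
    simp only [pvB, pvKwOf, List.any, PySem.Str.isIn_eq]
    set l := (PySem.Str.lower os_name).toList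
    by_cases h0 : PySem.Chars.isIn ['w','i','n'] l = true <;>
      simp_all [isIn_windows_absorb] <;> split_ifs <;> simp_all [pvFamilies]
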